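-- pv_equiv track=rewrite | github.com/entenschule/examples_py | a001_misc/b001_slugs/c01_lambda/__init__.py | find_slugs
-- ===== SOURCE A (Python) =====
-- from collections import defaultdict
-- from string import ascii_lowercase as alphabet
--
-- def find_slugs(database):
--     pid_to_slug = {pid: '' for pid in database}
--     blocks_to_refine = [list(pid_to_slug)]  # single block of all pids
--
--     step_functions = [
--         lambda _, pid: database[pid]['name1'],
--         lambda _, pid: database[pid]['name2'],
--         lambda _, pid: database[pid]['born'][2:4],
--         lambda i, _: alphabet[i],
--     ]
--
--     for step_fun in step_functions:
--
--         for block in blocks_to_refine: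
--             for i, pid in enumerate(block):
--                 pid_to_slug[pid] += step_fun(i, pid)
--
--         slug_to_block = defaultdict(list)
--         for pid, slug in pid_to_slug.items():
--             slug_to_block[slug].append(pid)
--
--         if len(slug_to_block) == len(database):
--             return pid_to_slug
--
--         blocks_to_refine = [block for block in slug_to_block.values() if len(block) > 1]
--
--     return pid_to_slug
-- ===== SOURCE B (Python) =====
-- from string import ascii_lowercase as alphabet
--
-- def find_slugs(database):
--     pids = list(database)
--
--     def refine(slug, extra):
--         # pointwise: a pid's slug grows iff some OTHER pid currently shares it;
--         # the disambiguator index is the pid's rank inside its slug group.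
--         return {p: slug[p] + extra([q for q in pids if slug[q] == slug[p]].index(p), p)
--                    if any(slug[q] == slug[p] for q in pids if q != p) else slug[p]
--                 for p in pids}
--
--     slug = {p: database[p]['name1'] for p in pids}
--     slug = refine(slug, lambda _, p: database[p]['name2'])
--     slug = refine(slug, lambda _, p: database[p]['born'][2:4])
--     slug = refine(slug, lambda i, _: alphabet[i])
--     return slug
-- ===== Notes on version B (the rewrite author's own statement) =====
-- stated objective: alternative
-- what changed: B abandons A's imperative refinement loop (mutable pid->slug dict, blocks_to_refine work queue, global regrouping and early return): each stage is a pure pointwise map in which a pid's slug grows exactly when some other pid currently shares it, with the disambiguator index obtained as the pid's rank inside its own slug group; the four stages are applied by plain function application, with no loop over steps, no block bookkeeping and no termination test.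
import Mathlib
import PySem

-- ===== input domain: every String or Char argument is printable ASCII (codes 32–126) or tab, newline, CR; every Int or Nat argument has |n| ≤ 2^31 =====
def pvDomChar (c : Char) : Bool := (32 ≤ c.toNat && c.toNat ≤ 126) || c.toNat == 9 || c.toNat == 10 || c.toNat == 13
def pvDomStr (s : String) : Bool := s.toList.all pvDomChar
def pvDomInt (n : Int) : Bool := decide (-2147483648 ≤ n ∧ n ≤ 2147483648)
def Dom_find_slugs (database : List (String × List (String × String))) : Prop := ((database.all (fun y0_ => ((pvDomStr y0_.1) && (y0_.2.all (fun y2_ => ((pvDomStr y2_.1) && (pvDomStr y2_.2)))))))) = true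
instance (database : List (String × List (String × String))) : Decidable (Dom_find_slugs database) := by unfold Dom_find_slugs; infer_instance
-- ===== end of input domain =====

-- B replaces A's imperative refinement loop (mutable slug dict, blocks_to_refine queue, global
-- regrouping, early return) by four pure pointwise stages: a pid's slug grows exactly when some
-- other pid currently shares it, the index being the pid's rank within its slug group
-- (objective: alternative; same return value).
-- Both ports receive the Python dict argument as an association list and normalise it with
-- Python's dict construction semantics (first-occurrence position, last value wins) via
-- PySem.Dict.ofList.  Lookups that would raise in Python (missing 'name1'/'name2'/'born'
-- keys, alphabet index ≥ 26) are ported with total getD-style defaults; exactly those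
-- raising inputs are excluded by Pre_find_slugs.

def pvDB (database : List (String × List (String × String))) :
    PySem.Dict String (PySem.Dict String String) :=
  PySem.Dict.ofList (database.map (fun p => (p.1, PySem.Dict.ofList p.2)))

def pvAlphabet : String := "abcdefghijklmnopqrstuvwxyz"

-- ===== PORT A =====
def pvStepsA (db : PySem.Dict String (PySem.Dict String String)) :
    List (Int → String → String) :=
  [ fun _ pid => (db.getD pid PySem.Dict.empty).getD "name1" "",
    fun _ pid => (db.getD pid PySem.Dict.empty).getD "name2" "",
    fun _ pid => PySem.Str.slice ((db.getD pid PySem.Dict.empty).getD "born" "") (some 2) (some 4),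
    fun i _ => (PySem.Str.pyGet? pvAlphabet i).elim "" (fun c => String.ofList [c]) ]

-- the inner loop: `for i, pid in enumerate(block): pid_to_slug[pid] += step_fun(i, pid)`
def pvF (f : Int → String → String) : PySem.Dict String String → List String → PySem.Dict String String :=
  fun d block => (PySem.List.enumerate block).foldl
    (fun d ip => d.insert ip.2 (d.getD ip.2 "" ++ f ip.1 ip.2)) d

def pvLoopA (n : Nat) (steps : List (Int → String → String))
    (slug : PySem.Dict String String) (blocks : List (List String)) :
    PySem.Dict String String :=
  match steps with
  | [] => slug
  | f :: rest =>
    let slug' := blocks.foldl (pvF f) slug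
    let groups := slug'.items.foldl
        (fun g pr => g.modify pr.2 [] (fun b => b ++ [pr.1])) PySem.Dict.empty
    if groups.size = n then slug'
    else pvLoopA n rest slug' (groups.values.filter (fun b => 1 < b.length))

def find_slugs (database : List (String × List (String × String))) : List (String × String) :=
  let db := pvDB database
  let pid_to_slug := PySem.Dict.ofList (db.keys.map (fun pid => (pid, "")))
  (pvLoopA db.size (pvStepsA db) pid_to_slug [pid_to_slug.keys]).items

-- ===== PORT B =====
-- Source B's `refine(slug, extra)`: a pure dict comprehension over pids.
-- `[q for q in pids if slug[q]==slug[p]].index(p)` is ported with idxOf: p is always a member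
-- of its own slug group (slug[p]==slug[p]), so Python's list.index never raises here.
def pvRefine (pids : List String) (slug : PySem.Dict String String)
    (extra : Int → String → String) : PySem.Dict String String :=
  PySem.Dict.ofList (pids.map (fun p =>
    (p, if pids.any (fun q => q != p && (slug.getD q "" == slug.getD p "")) then
          slug.getD p "" ++ extra
            (((pids.filter (fun q => slug.getD q "" == slug.getD p "")).idxOf p : Nat) : Int) p
        else slug.getD p "")))

def find_slugs_alt (database : List (String × List (String × String))) : List (String × String) :=
  let db := pvDB database
  let pids := db.keys
  let slug1 := PySem.Dict.ofList (pids.map (fun p => (p, (db.getD p PySem.Dict.empty).getD "name1" "")))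
  let slug2 := pvRefine pids slug1 (fun _ p => (db.getD p PySem.Dict.empty).getD "name2" "")
  let slug3 := pvRefine pids slug2 (fun _ p => PySem.Str.slice ((db.getD p PySem.Dict.empty).getD "born" "") (some 2) (some 4))
  let slug4 := pvRefine pids slug3 (fun i _ => (PySem.Str.pyGet? pvAlphabet i).elim "" (fun c => String.ofList [c]))
  slug4.items

-- ===== PRECONDITION & SPEC =====
-- Pre_ holds exactly where Python A returns normally: it excludes the KeyError inputs (a record
-- missing 'name1'; missing 'name2'/'born' on a pid whose slug is still colliding when that step
-- runs) and the IndexError inputs (more than 26 pids whose slugs still coincide at the letter step).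
def pvPre (database : List (String × List (String × String))) : Bool :=
  let db := pvDB database
  let pids := db.keys
  let rec_ := fun p => db.getD p PySem.Dict.empty
  let n1 := fun p => (rec_ p).getD "name1" ""
  let sh1 := fun p => pids.any (fun q => q != p && n1 q == n1 p)
  let s2 := fun p => n1 p ++ (if sh1 p then (rec_ p).getD "name2" "" else "")
  let sh2 := fun p => pids.any (fun q => q != p && s2 q == s2 p)
  let s3 := fun p =>
    s2 p ++ (if sh2 p then PySem.Str.slice ((rec_ p).getD "born" "") (some 2) (some 4) else "")
  pids.all (fun p => (rec_ p).contains "name1") &&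
  pids.all (fun p => !sh1 p || (rec_ p).contains "name2") &&
  pids.all (fun p => !sh2 p || (rec_ p).contains "born") &&
  pids.all (fun p => (pids.filter (fun q => s3 q == s3 p)).length ≤ 26)

def Pre_find_slugs (database : List (String × List (String × String))) : Prop :=
  pvPre database = true
instance (database : List (String × List (String × String))) : Decidable (Pre_find_slugs database) := by
  unfold Pre_find_slugs; infer_instance

def pvWitness_find_slugs : (List (String × List (String × String))) :=
  [("p1", [("name1", "ann"), ("name2", "b"), ("born", "1984")]),
   ("p2", [("name1", "ann"), ("name2", "c"), ("born", "1984")])]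

def Spec_find_slugs (database : List (String × List (String × String))) (out : List (String × String)) : Prop := out = find_slugs_alt database
instance (database : List (String × List (String × String))) (out : List (String × String)) : Decidable (Spec_find_slugs database out) := by unfold Spec_find_slugs; infer_instance

-- ===== CLAIM (what is proved, stated in full; the proofs are below) =====
def Claim_equal_find_slugs : Prop := ∀ (database : List (String × List (String × String))), Dom_find_slugs database → Pre_find_slugs database → Spec_find_slugs database (find_slugs database)

-- ===== LEMMAS AND PROOFS =====

-- list-level picture shared by the two proofs: one refinement step over the slug list
def pvRefineB (f : Int → String → String) (pids slugs : List String) : List String :=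
  (PySem.List.enumerate (pids.zip slugs)).map (fun jp =>
    if 1 < slugs.count jp.2.2 then
      jp.2.2 ++ f (((PySem.List.slice slugs none (some jp.1)).count jp.2.2 : Nat) : Int) jp.2.1
    else jp.2.2)

def pvChain (steps : List (Int → String → String)) (pids slugs : List String) : List String :=
  steps.foldl (fun sl f => pvRefineB f pids sl) slugs

-- the pids holding a given slug, in order
def pvMembers (pids slugs : List String) (s : String) : List String :=
  ((slugs.zip pids).filter (fun pr => pr.1 == s)).map (·.2)

-- the blocks A refines next: slug classes with more than one member, in first-occurrence order
def pvBlocksOf (pids slugs : List String) : List (List String) :=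
  ((PySem.Set.ofList slugs).map (pvMembers pids slugs)).filter (fun b => 1 < b.length)

def pvDZ (pids slugs : List String) : PySem.Dict String String :=
  PySem.Dict.ofList (pids.zip slugs)

theorem pvDZ_items (pids slugs : List String) (hnd : pids.Nodup)
    (hlen : slugs.length = pids.length) : (pvDZ pids slugs).items = pids.zip slugs := by
  have h := PySem.Dict.items_foldl_insert_fresh (pids.zip slugs) Prod.fst Prod.snd
      PySem.Dict.empty (by intro a _; rfl)
      (by rw [List.map_fst_zip (le_of_eq hlen.symm)]; exact hnd)
  simpa using h

theorem pvDZ_keys (pids slugs : List String) (hnd : pids.Nodup)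
    (hlen : slugs.length = pids.length) : (pvDZ pids slugs).keys = pids := by
  unfold PySem.Dict.keys
  rw [pvDZ_items pids slugs hnd hlen, List.map_fst_zip (le_of_eq hlen.symm)]

theorem pvDZ_getD (pids slugs : List String) (hnd : pids.Nodup)
    (hlen : slugs.length = pids.length) (j : Nat) (hj : j < pids.length) :
    (pvDZ pids slugs).getD (pids[j]'hj) "" = slugs[j]'(by omega) := by
  apply PySem.Dict.getD_of_mem_items
  · rw [pvDZ_items pids slugs hnd hlen]
    rw [List.mem_iff_getElem]
    exact ⟨j, by rw [List.length_zip]; omega, List.getElem_zip⟩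
  · rw [pvDZ_keys pids slugs hnd hlen]; exact hnd

theorem pvSet_ofList_sublist {α : Type} [BEq α] [LawfulBEq α] (xs : List α) :
    (PySem.Set.ofList xs).Sublist xs := by
  have key : ∀ (xs acc ys : List α), acc.Sublist ys →
      (List.foldl PySem.Set.add acc xs).Sublist (ys ++ xs) := by
    intro xs
    induction xs with
    | nil => intro acc ys h; simpa using h
    | cons x t ih =>
      intro acc ys h
      have h2 : (PySem.Set.add acc x).Sublist (ys ++ [x]) := by
        unfold PySem.Set.add
        split
        · exact h.trans (List.sublist_append_left ys [x])
        · exact List.Sublist.append h (List.Sublist.refl [x])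
      have := ih (PySem.Set.add acc x) (ys ++ [x]) h2
      simpa using this
  simpa using key xs [] [] (List.Sublist.refl [])

theorem pvNodup_of_len {α : Type} [BEq α] [LawfulBEq α] (xs : List α)
    (h : (PySem.Set.ofList xs).length = xs.length) : xs.Nodup := by
  have := (pvSet_ofList_sublist xs).eq_of_length h
  rw [← this]; exact PySem.Set.nodup_ofList xs

-- A's grouping fold, characterised
theorem pvGroups_getD (pids slugs : List String) (s : String) :
    ((pids.zip slugs).foldl (fun g pr => g.modify pr.2 [] (fun b => b ++ [pr.1]))
      (PySem.Dict.empty : PySem.Dict String (List String))).getD s [] = pvMembers pids slugs s := by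
  have hfold : (pids.zip slugs).foldl (fun g pr => g.modify pr.2 [] (fun b => b ++ [pr.1]))
      (PySem.Dict.empty : PySem.Dict String (List String))
      = (((pids.zip slugs).map Prod.swap).foldl (fun g pr => g.modify pr.1 [] (fun b => b ++ [pr.2]))
      (PySem.Dict.empty : PySem.Dict String (List String))) := by
    rw [List.foldl_map]
    simp [Prod.swap]
  rw [hfold, List.zip_swap, PySem.Dict.getD_foldl_modify_append]
  simp [pvMembers]

theorem pvGroups_keys (pids slugs : List String) (hlen : slugs.length = pids.length) :
    ((pids.zip slugs).foldl (fun g pr => g.modify pr.2 [] (fun b => b ++ [pr.1]))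
      (PySem.Dict.empty : PySem.Dict String (List String))).keys = PySem.Set.ofList slugs := by
  have h := PySem.Dict.keys_foldl_modify_key (pids.zip slugs) (fun pr => pr.2) []
      (fun _ pr => (fun b => b ++ [pr.1]))
      (PySem.Dict.empty : PySem.Dict String (List String))
  simp only at h
  rw [h]
  have : List.map (fun pr => pr.2) (pids.zip slugs) = slugs := List.map_snd_zip (le_of_eq hlen)
  rw [this]
  rfl

theorem pvGroups_items (pids slugs : List String) (hlen : slugs.length = pids.length) :
    ((pids.zip slugs).foldl (fun g pr => g.modify pr.2 [] (fun b => b ++ [pr.1]))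
      (PySem.Dict.empty : PySem.Dict String (List String))).items
      = (PySem.Set.ofList slugs).map (fun s => (s, pvMembers pids slugs s)) := by
  rw [PySem.Dict.items_eq_map_keys _
      (by rw [pvGroups_keys pids slugs hlen]; exact PySem.Set.nodup_ofList slugs) []]
  rw [pvGroups_keys pids slugs hlen]
  exact List.map_congr_left (fun s _ => by rw [pvGroups_getD])

theorem pvMembers_length (pids slugs : List String) (hlen : slugs.length = pids.length)
    (s : String) : (pvMembers pids slugs s).length = slugs.count s := by
  unfold pvMembers
  rw [List.length_map]
  induction slugs generalizing pids with
  | nil => simp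
  | cons x t ih =>
    cases pids with
    | nil => simp at hlen
    | cons p ps =>
      simp only [List.zip_cons_cons, List.filter_cons, List.count_cons]
      by_cases hx : x = s
      · simp [hx, List.length_cons, ih ps (by simpa using hlen)]
      · have hb : ((x, p).1 == s) = false := by simpa using hx
        simp [hb, ih ps (by simpa using hlen)]

theorem pvMem_members_iff (pids slugs : List String) (s : String) (x : String) :
    x ∈ pvMembers pids slugs s ↔
      ∃ (i : Nat) (h1 : i < slugs.length) (h2 : i < pids.length),
        slugs[i] = s ∧ pids[i] = x := by
  unfold pvMembers
  simp only [List.mem_map, List.mem_filter]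
  constructor
  · rintro ⟨pr, ⟨hmem, hfst⟩, hsnd⟩
    rw [List.mem_iff_getElem] at hmem
    obtain ⟨i, hi, hpr⟩ := hmem
    rw [List.length_zip] at hi
    refine ⟨i, by omega, by omega, ?_, ?_⟩
    · have := List.getElem_zip (l := slugs) (l' := pids) (i := i)
        (h := by rw [List.length_zip]; omega)
      rw [this] at hpr
      have : pr.1 = slugs[i] := by rw [← hpr]
      simp [← this]; simpa using hfst
    · have := List.getElem_zip (l := slugs) (l' := pids) (i := i)
        (h := by rw [List.length_zip]; omega)
      rw [this] at hpr
      have : pr.2 = pids[i] := by rw [← hpr]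
      rw [← this]; exact hsnd
  · rintro ⟨i, h1, h2, hs, hx⟩
    refine ⟨(slugs[i], pids[i]), ⟨?_, by simpa using hs⟩, hx⟩
    rw [List.mem_iff_getElem]
    exact ⟨i, by rw [List.length_zip]; omega, List.getElem_zip⟩

theorem pvMem_members_getElem (pids slugs : List String) (hnd : pids.Nodup)
    (hlen : slugs.length = pids.length) (j : Nat) (hj : j < pids.length) (s : String) :
    (pids[j] ∈ pvMembers pids slugs s) ↔ slugs[j]'(by omega) = s := by
  rw [pvMem_members_iff]
  constructor
  · rintro ⟨i, h1, h2, hs, hx⟩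
    have : i = j := (List.Nodup.getElem_inj_iff hnd).mp hx
    subst this; exact hs
  · intro h; exact ⟨j, by omega, hj, h, rfl⟩

theorem pvMembers_nodup (pids slugs : List String) (hnd : pids.Nodup)
    (hlen : slugs.length = pids.length) (s : String) :
    (pvMembers pids slugs s).Nodup := by
  unfold pvMembers
  have hsub : (((slugs.zip pids).filter (fun pr => pr.1 == s)).map (·.2)).Sublist
      ((slugs.zip pids).map (·.2)) := List.Sublist.map _ List.filter_sublist
  have : (slugs.zip pids).map (·.2) = pids := List.map_snd_zip (le_of_eq hlen.symm)
  rw [this] at hsub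
  exact hnd.sublist hsub

theorem pvIdxOf_members (pids slugs : List String) (hnd : pids.Nodup)
    (hlen : slugs.length = pids.length) (j : Nat) (hj : j < pids.length) :
    (pvMembers pids slugs (slugs[j]'(by omega))).idxOf (pids[j]'hj)
      = (slugs.take j).count (slugs[j]'(by omega)) := by
  induction pids generalizing slugs j with
  | nil => simp at hj
  | cons p ps ih =>
    cases slugs with
    | nil => simp at hlen
    | cons x t =>
      unfold pvMembers
      simp only [List.zip_cons_cons, List.filter_cons]
      cases j with
      | zero =>
        simp only [List.getElem_cons_zero]
        rw [if_pos (by simp)]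
        simp [List.idxOf_cons_self]
      | succ k =>
        simp only [List.getElem_cons_succ]
        have hk : k < ps.length := by simpa using hj
        have hlen' : t.length = ps.length := by simpa using hlen
        have hrec := ih t hnd.of_cons hlen' k hk
        by_cases hx : x = t[k]'(by omega)
        · rw [if_pos (by simpa using hx)]
          simp only [List.map_cons]
          have hpne : p ≠ ps[k] := by
            have hmem : ps[k] ∈ ps := List.getElem_mem hk
            intro h
            rw [← h] at hmem
            exact (List.nodup_cons.mp hnd).1 hmem
          rw [List.idxOf_cons_ne _ hpne]
          unfold pvMembers at hrec
          rw [hrec]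
          simp [hx]
        · rw [if_neg (by simpa using hx)]
          unfold pvMembers at hrec
          rw [hrec]
          simp [hx]

-- the inner enumerate/insert fold of A, characterised
theorem pvInner_getD (f : Int → String → String) (block : List String) (hb : block.Nodup) :
    ∀ (d : PySem.Dict String String) (s : Int) (q : String),
    (((PySem.List.enumerate block s).foldl
        (fun d ip => d.insert ip.2 (d.getD ip.2 "" ++ f ip.1 ip.2)) d)).getD q ""
      = if q ∈ block then d.getD q "" ++ f (s + (block.idxOf q : Int)) q else d.getD q "" := by
  induction block with
  | nil => intro d s q; simp [PySem.List.enumerate_nil]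
  | cons x t ih =>
    intro d s q
    rw [PySem.List.enumerate_cons]
    simp only [List.foldl_cons]
    have hnd : t.Nodup := hb.of_cons
    have hx : x ∉ t := by simp at hb; exact hb.1
    rw [ih hnd _ (s + 1) q]
    by_cases hq : q = x
    · subst hq
      rw [if_neg hx, PySem.Dict.getD_insert_self]
      rw [if_pos (List.mem_cons_self)]
      simp [List.idxOf_cons_self]
    · rw [PySem.Dict.getD_insert_of_ne _ _ _ hq]
      by_cases hqt : q ∈ t
      · rw [if_pos hqt, if_pos (List.mem_cons_of_mem x hqt)]
        have : (x :: t).idxOf q = t.idxOf q + 1 := List.idxOf_cons_ne _ (by exact fun h => hq h.symm)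
        rw [this]
        congr 2
        push_cast
        omega
      · rw [if_neg hqt, if_neg (by simp [hq, hqt])]

theorem pvSet_update_absorb {α : Type} [BEq α] [LawfulBEq α] (xs : List α) :
    ∀ (s : PySem.Set α), (∀ x ∈ xs, x ∈ s) → PySem.Set.update s xs = s := by
  induction xs with
  | nil => intro s _; rfl
  | cons x t ih =>
    intro s hsub
    unfold PySem.Set.update
    simp only [List.foldl_cons]
    have : PySem.Set.add s x = s := by
      unfold PySem.Set.add
      rw [if_pos]
      have hm := hsub x List.mem_cons_self
      simp [PySem.Set.contains] at hm ⊢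
      exact hm
    rw [this]
    exact ih s (fun y hy => hsub y (List.mem_cons_of_mem x hy))

theorem pvInner_keys (f : Int → String → String) (block : List String)
    (d : PySem.Dict String String) (s : Int) (hsub : ∀ q ∈ block, q ∈ d.keys) :
    (((PySem.List.enumerate block s).foldl
        (fun d ip => d.insert ip.2 (d.getD ip.2 "" ++ f ip.1 ip.2)) d)).keys = d.keys := by
  have h := PySem.Dict.keys_foldl_insert_key (PySem.List.enumerate block s)
      (fun ip => ip.2) (fun d ip => d.getD ip.2 "" ++ f ip.1 ip.2) d
  simp only at h
  rw [h, PySem.List.map_snd_enumerate]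
  exact pvSet_update_absorb block d.keys hsub

theorem pvF_getD (f : Int → String → String) (b : List String) (hb : b.Nodup)
    (d : PySem.Dict String String) (q : String) :
    (pvF f d b).getD q ""
      = if q ∈ b then d.getD q "" ++ f (b.idxOf q : Int) q else d.getD q "" := by
  unfold pvF
  rw [pvInner_getD f b hb d 0 q]
  have h0 : (0 : Int) + (b.idxOf q : Int) = (b.idxOf q : Int) := by omega
  rw [h0]

theorem pvOuter_notmem (f : Int → String → String) (blocks : List (List String))
    (hnd : ∀ b ∈ blocks, b.Nodup) (d : PySem.Dict String String) (q : String)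
    (h : ∀ b ∈ blocks, q ∉ b) :
    (blocks.foldl (pvF f) d).getD q "" = d.getD q "" := by
  induction blocks generalizing d with
  | nil => rfl
  | cons b bs ih =>
    simp only [List.foldl_cons]
    rw [ih (fun c hc => hnd c (List.mem_cons_of_mem b hc)) _
        (fun c hc => h c (List.mem_cons_of_mem b hc))]
    rw [pvF_getD f b (hnd b List.mem_cons_self) d q,
        if_neg (h b List.mem_cons_self)]

theorem pvOuter_mem (f : Int → String → String) (pre : List (List String))
    (b : List String) (post : List (List String))
    (hnd : ∀ c ∈ pre ++ b :: post, c.Nodup) (d : PySem.Dict String String) (q : String)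
    (hq : q ∈ b) (hpre : ∀ c ∈ pre, q ∉ c) (hpost : ∀ c ∈ post, q ∉ c) :
    ((pre ++ b :: post).foldl (pvF f) d).getD q ""
      = d.getD q "" ++ f (b.idxOf q : Int) q := by
  rw [List.foldl_append, List.foldl_cons]
  rw [pvOuter_notmem f post (fun c hc => hnd c (by simp [hc])) _ q hpost]
  rw [pvF_getD f b (hnd b (by simp)) _ q, if_pos hq]
  rw [pvOuter_notmem f pre (fun c hc => hnd c (by simp [hc])) d q hpre]

theorem pvRefineB_length (f : Int → String → String) (pids slugs : List String)
    (hlen : slugs.length = pids.length) : (pvRefineB f pids slugs).length = slugs.length := by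
  unfold pvRefineB
  rw [List.length_map, PySem.List.length_enumerate, List.length_zip]
  omega

theorem pvRefine_getElem (f : Int → String → String) (pids slugs : List String)
    (hlen : slugs.length = pids.length) (j : Nat) (hj : j < pids.length) :
    (pvRefineB f pids slugs)[j]'(by rw [pvRefineB_length f pids slugs hlen]; omega)
      = if 1 < slugs.count (slugs[j]'(by omega)) then
          (slugs[j]'(by omega)) ++ f (((slugs.take j).count (slugs[j]'(by omega)) : Nat) : Int) (pids[j]'hj)
        else slugs[j]'(by omega) := by
  unfold pvRefineB
  rw [List.getElem_map]
  rw [PySem.List.getElem_enumerate]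
  simp only [List.getElem_zip]
  have h0 : (0 : Int) + (j : Int) = ((j : Nat) : Int) := by omega
  rw [h0, PySem.List.slice_to_natCast]

theorem pvOuter_keys (f : Int → String → String) (blocks : List (List String)) :
    ∀ (d : PySem.Dict String String), (∀ b ∈ blocks, ∀ q ∈ b, q ∈ d.keys) →
    (blocks.foldl (pvF f) d).keys = d.keys := by
  induction blocks with
  | nil => intro d _; rfl
  | cons b bs ih =>
    intro d hsub
    simp only [List.foldl_cons]
    have hb : (pvF f d b).keys = d.keys :=
      pvInner_keys f b d 0 (hsub b List.mem_cons_self)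
    rw [ih (pvF f d b) (by rw [hb]; exact fun c hc => hsub c (List.mem_cons_of_mem b hc)), hb]

theorem pvBlocks_nodup (pids slugs : List String) (hnd : pids.Nodup)
    (hlen : slugs.length = pids.length) :
    ∀ b ∈ pvBlocksOf pids slugs, b.Nodup := by
  intro b hb
  unfold pvBlocksOf at hb
  obtain ⟨s, _, rfl⟩ := List.mem_map.mp (List.mem_of_mem_filter hb)
  exact pvMembers_nodup pids slugs hnd hlen s

theorem pvBlocks_sub (pids slugs : List String)
    (hlen : slugs.length = pids.length) :
    ∀ b ∈ pvBlocksOf pids slugs, ∀ q ∈ b, q ∈ pids := by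
  intro b hb q hq
  unfold pvBlocksOf at hb
  obtain ⟨s, _, rfl⟩ := List.mem_map.mp (List.mem_of_mem_filter hb)
  unfold pvMembers at hq
  obtain ⟨pr, hpr, rfl⟩ := List.mem_map.mp hq
  have hmem := List.mem_of_mem_filter hpr
  rw [List.mem_iff_getElem] at hmem
  obtain ⟨i, hi, hpr2⟩ := hmem
  rw [List.length_zip] at hi
  have hz := List.getElem_zip (l := slugs) (l' := pids) (i := i)
      (h := by rw [List.length_zip]; omega)
  rw [hz] at hpr2
  have : pr.2 = pids[i]'(by omega) := by rw [← hpr2]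
  rw [this]
  exact List.getElem_mem _

-- the application of one step over A's blocks, pointwise
theorem pvStep_getD (f : Int → String → String) (pids slugs : List String) (hnd : pids.Nodup)
    (hlen : slugs.length = pids.length) (j : Nat) (hj : j < pids.length) :
    ((pvBlocksOf pids slugs).foldl (pvF f) (pvDZ pids slugs)).getD (pids[j]'hj) ""
      = if 1 < slugs.count (slugs[j]'(by omega)) then
          (slugs[j]'(by omega)) ++ f (((slugs.take j).count (slugs[j]'(by omega)) : Nat) : Int) (pids[j]'hj)
        else slugs[j]'(by omega) := by
  by_cases hc : 1 < slugs.count (slugs[j]'(by omega))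
  · set s := slugs[j]'(by omega) with hs
    have hmem : s ∈ PySem.Set.ofList slugs := by
      rw [PySem.Set.mem_ofList]; exact List.getElem_mem (by omega)
    obtain ⟨l1, l2, hsplit⟩ := List.append_of_mem hmem
    have hnds : (l1 ++ s :: l2).Nodup := by
      rw [← hsplit]; exact PySem.Set.nodup_ofList slugs
    have hnd3 := List.nodup_append.mp hnds
    have hs1 : s ∉ l1 := fun h => hnd3.2.2 s h s List.mem_cons_self rfl
    have hs2 : s ∉ l2 := (List.nodup_cons.mp hnd3.2.1).1
    have hP : (1 < (pvMembers pids slugs s).length) := by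
      rw [pvMembers_length pids slugs hlen s]; exact hc
    have hblocks : pvBlocksOf pids slugs
        = ((l1.map (pvMembers pids slugs)).filter (fun b => 1 < b.length))
          ++ pvMembers pids slugs s
          :: ((l2.map (pvMembers pids slugs)).filter (fun b => 1 < b.length)) := by
      unfold pvBlocksOf
      rw [hsplit, List.map_append, List.map_cons, List.filter_append, List.filter_cons]
      rw [if_pos (by simpa using hP)]
    rw [hblocks]
    rw [pvOuter_mem f _ _ _ ?hnd _ _ ?hq ?hpre ?hpost]
    case hnd =>
      rw [← hblocks]
      exact pvBlocks_nodup pids slugs hnd hlen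
    case hq => rw [pvMem_members_getElem pids slugs hnd hlen j hj s]
    case hpre =>
      intro c hc'
      obtain ⟨t, ht, rfl⟩ := List.mem_map.mp (List.mem_of_mem_filter hc')
      rw [pvMem_members_getElem pids slugs hnd hlen j hj t]
      intro h
      rw [← h] at ht
      exact hs1 ht
    case hpost =>
      intro c hc'
      obtain ⟨t, ht, rfl⟩ := List.mem_map.mp (List.mem_of_mem_filter hc')
      rw [pvMem_members_getElem pids slugs hnd hlen j hj t]
      intro h
      rw [← h] at ht
      exact hs2 ht
    rw [pvDZ_getD pids slugs hnd hlen j hj]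
    rw [if_pos hc]
    rw [pvIdxOf_members pids slugs hnd hlen j hj]
  · rw [pvOuter_notmem f _ (pvBlocks_nodup pids slugs hnd hlen) _ _ ?hnm]
    case hnm =>
      intro b hb
      unfold pvBlocksOf at hb
      have hf := List.of_mem_filter hb
      obtain ⟨t, ht, rfl⟩ := List.mem_map.mp (List.mem_of_mem_filter hb)
      rw [pvMem_members_getElem pids slugs hnd hlen j hj t]
      intro h
      rw [← h] at hf
      rw [pvMembers_length pids slugs hlen] at hf
      simp at hf
      omega
    rw [pvDZ_getD pids slugs hnd hlen j hj, if_neg hc]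

-- one A step over its blocks = the shared list-level step
theorem pvStep_eq (f : Int → String → String) (pids slugs : List String) (hnd : pids.Nodup)
    (hlen : slugs.length = pids.length) :
    (pvBlocksOf pids slugs).foldl (pvF f) (pvDZ pids slugs)
      = pvDZ pids (pvRefineB f pids slugs) := by
  have hlen' : (pvRefineB f pids slugs).length = pids.length := by
    rw [pvRefineB_length f pids slugs hlen]; omega
  have hkeys : ((pvBlocksOf pids slugs).foldl (pvF f) (pvDZ pids slugs)).keys = pids := by
    rw [pvOuter_keys f _ _ (by
      intro b hb q hq
      rw [pvDZ_keys pids slugs hnd hlen]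
      exact pvBlocks_sub pids slugs hlen b hb q hq)]
    exact pvDZ_keys pids slugs hnd hlen
  apply PySem.Dict.ext
  rw [PySem.Dict.items_eq_map_keys _ (by rw [hkeys]; exact hnd) ""]
  rw [hkeys, pvDZ_items pids _ hnd hlen']
  apply List.ext_getElem
  · rw [List.length_map, List.length_zip]; omega
  intro j hj1 hj2
  have hj : j < pids.length := by rwa [List.length_map] at hj1
  rw [List.getElem_map, List.getElem_zip]
  refine Prod.ext rfl ?_
  simp only
  rw [pvStep_getD f pids slugs hnd hlen j hj,
      pvRefine_getElem f pids slugs hlen j hj]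

-- B's pointwise dict refinement = the shared list-level step
theorem pvFilter_zip (s : String) (p : String → Bool) :
    ∀ (l1 l2 : List String) (hlen : l2.length = l1.length),
    (∀ (j : Nat) (h1 : j < l1.length), p (l1[j]) = ((l2[j]'(by omega)) == s)) →
    l1.filter p = ((l2.zip l1).filter (fun pr => pr.1 == s)).map (·.2) := by
  intro l1
  induction l1 with
  | nil => intro l2 _ _; simp
  | cons x t ih =>
    intro l2 hlen h
    cases l2 with
    | nil => simp at hlen
    | cons y u =>
      have h0 := h 0 (by simp)
      simp only [List.getElem_cons_zero] at h0
      simp only [List.zip_cons_cons, List.filter_cons, h0]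
      have htail := ih u (by simpa using hlen)
          (fun j hj => by simpa using h (j+1) (by simpa using hj))
      cases hys : (y == s) with
      | false => simpa [hys] using htail
      | true => simpa [hys] using htail

theorem pvFilter_members (pids slugs : List String) (hnd : pids.Nodup)
    (hlen : slugs.length = pids.length) (s : String) :
    pids.filter (fun q => ((pvDZ pids slugs).getD q "" == s)) = pvMembers pids slugs s := by
  unfold pvMembers
  exact pvFilter_zip s _ pids slugs hlen
    (fun j hj => by rw [pvDZ_getD pids slugs hnd hlen j hj])

theorem pvOne_lt_of_other {α : Type} (l : List α) (hnd : l.Nodup) (p : α) (hp : p ∈ l) :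
    (1 < l.length) ↔ ∃ x ∈ l, x ≠ p := by
  constructor
  · intro hlen
    match l, hlen with
    | a :: b :: rest, _ =>
      by_cases ha : a = p
      · refine ⟨b, by simp, ?_⟩
        intro hb
        rw [ha, ← hb] at hnd
        simp at hnd
      · exact ⟨a, by simp, ha⟩
  · rintro ⟨x, hx, hne⟩
    match l, hp, hx with
    | [a], hp, hx =>
      simp at hp hx
      exact absurd (hx.trans hp.symm) hne
    | a :: b :: rest, _, _ => simp
    | [], hp, _ => simp at hp

theorem pvAny_eq (pids slugs : List String) (hnd : pids.Nodup)
    (hlen : slugs.length = pids.length) (j : Nat) (hj : j < pids.length) :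
    (pids.any (fun q => q != pids[j] && ((pvDZ pids slugs).getD q "" == slugs[j]'(by omega))))
      = decide (1 < slugs.count (slugs[j]'(by omega))) := by
  set s := slugs[j]'(by omega) with hs
  have hcnt : slugs.count s = (pvMembers pids slugs s).length :=
    (pvMembers_length pids slugs hlen s).symm
  have hmem : pids[j] ∈ pvMembers pids slugs s :=
    (pvMem_members_getElem pids slugs hnd hlen j hj s).mpr rfl
  have hmnd : (pvMembers pids slugs s).Nodup := pvMembers_nodup pids slugs hnd hlen s
  cases hval : (pids.any (fun q => q != pids[j] && ((pvDZ pids slugs).getD q "" == s))) with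
  | true =>
    rw [List.any_eq_true] at hval
    obtain ⟨q, hq, hcond⟩ := hval
    rw [Bool.and_eq_true, bne_iff_ne, beq_iff_eq] at hcond
    rw [List.mem_iff_getElem] at hq
    obtain ⟨i, hi, rfl⟩ := hq
    rw [pvDZ_getD pids slugs hnd hlen i hi] at hcond
    have hx : pids[i] ∈ pvMembers pids slugs s :=
      (pvMem_members_getElem pids slugs hnd hlen i hi s).mpr hcond.2
    symm
    rw [decide_eq_true_iff, hcnt]
    exact (pvOne_lt_of_other _ hmnd _ hmem).mpr ⟨pids[i], hx, hcond.1⟩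
  | false =>
    symm
    rw [decide_eq_false_iff_not, hcnt]
    rw [pvOne_lt_of_other _ hmnd _ hmem]
    rintro ⟨x, hx, hne⟩
    rw [pvMem_members_iff] at hx
    obtain ⟨i, h1, h2, hsi, hxi⟩ := hx
    rw [List.any_eq_false] at hval
    have hthis := hval pids[i] (List.getElem_mem h2)
    rw [pvDZ_getD pids slugs hnd hlen i h2] at hthis
    simp only [Bool.and_eq_true, bne_iff_ne, beq_iff_eq, not_and] at hthis
    exact hthis (by rw [hxi]; exact hne) hsi

theorem pvRefine_eq (extra : Int → String → String) (pids slugs : List String)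
    (hnd : pids.Nodup) (hlen : slugs.length = pids.length) :
    pvRefine pids (pvDZ pids slugs) extra = pvDZ pids (pvRefineB extra pids slugs) := by
  have hlen' : (pvRefineB extra pids slugs).length = pids.length := by
    rw [pvRefineB_length extra pids slugs hlen]; omega
  unfold pvRefine
  show _ = PySem.Dict.ofList (pids.zip (pvRefineB extra pids slugs))
  congr 1
  apply List.ext_getElem
  · rw [List.length_map, List.length_zip]; omega
  intro j hj1 hj2
  have hj : j < pids.length := by rwa [List.length_map] at hj1
  rw [List.getElem_map, List.getElem_zip]
  refine Prod.ext rfl ?_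
  simp only
  rw [pvRefine_getElem extra pids slugs hlen j hj]
  rw [pvDZ_getD pids slugs hnd hlen j hj]
  rw [pvAny_eq pids slugs hnd hlen j hj]
  rw [pvFilter_members pids slugs hnd hlen]
  by_cases hc : 1 < slugs.count (slugs[j]'(by omega))
  · rw [if_pos hc, if_pos (by exact decide_eq_true hc)]
    rw [pvIdxOf_members pids slugs hnd hlen j hj]
  · rw [if_neg hc, if_neg (by simp [hc])]

theorem pvRefine_of_nodup (f : Int → String → String) (pids slugs : List String)
    (hnd2 : slugs.Nodup) (hlen : slugs.length = pids.length) :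
    pvRefineB f pids slugs = slugs := by
  apply List.ext_getElem
  · rw [pvRefineB_length f pids slugs hlen]
  intro j hj1 hj2
  have hj : j < pids.length := by omega
  rw [pvRefine_getElem f pids slugs hlen j hj]
  rw [if_neg]
  have := (List.nodup_iff_count_le_one.mp hnd2) (slugs[j]'(by omega))
  omega

theorem pvChain_of_nodup (steps : List (Int → String → String)) (pids : List String) :
    ∀ slugs, slugs.Nodup → slugs.length = pids.length → pvChain steps pids slugs = slugs := by
  induction steps with
  | nil => intro slugs _ _; rfl
  | cons f rest ih =>
    intro slugs hnd2 hlen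
    show pvChain rest pids (pvRefineB f pids slugs) = slugs
    rw [pvRefine_of_nodup f pids slugs hnd2 hlen]
    exact ih slugs hnd2 hlen

-- A's refinement loop = the chain of list-level steps
theorem pvLoop_eq (steps : List (Int → String → String)) (pids : List String)
    (hnd : pids.Nodup) : ∀ slugs, slugs.length = pids.length →
    pvLoopA pids.length steps (pvDZ pids slugs) (pvBlocksOf pids slugs)
      = pvDZ pids (pvChain steps pids slugs) := by
  induction steps with
  | nil => intro slugs _; rfl
  | cons f rest ih =>
    intro slugs hlen
    have hlen2 : (pvRefineB f pids slugs).length = pids.length := by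
      rw [pvRefineB_length f pids slugs hlen]; omega
    simp only [pvLoopA]
    rw [pvStep_eq f pids slugs hnd hlen]
    rw [pvDZ_items pids _ hnd hlen2]
    have hsize : (((pids.zip (pvRefineB f pids slugs)).foldl
        (fun g pr => g.modify pr.2 [] (fun b => b ++ [pr.1]))
        (PySem.Dict.empty : PySem.Dict String (List String))).size)
        = (PySem.Set.ofList (pvRefineB f pids slugs)).length := by
      unfold PySem.Dict.size
      rw [pvGroups_items pids _ hlen2, List.length_map]
    have hvals : (((pids.zip (pvRefineB f pids slugs)).foldl
        (fun g pr => g.modify pr.2 [] (fun b => b ++ [pr.1]))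
        (PySem.Dict.empty : PySem.Dict String (List String))).values.filter
          (fun b => 1 < b.length))
        = pvBlocksOf pids (pvRefineB f pids slugs) := by
      unfold PySem.Dict.values
      rw [pvGroups_items pids _ hlen2, List.map_map]
      rfl
    rw [hsize, hvals]
    show (if _ then _ else _) = pvDZ pids (pvChain rest pids (pvRefineB f pids slugs))
    by_cases hnew : (PySem.Set.ofList (pvRefineB f pids slugs)).length = pids.length
    · rw [if_pos hnew]
      rw [pvChain_of_nodup rest pids _ (pvNodup_of_len _ (by rw [hnew, hlen2])) hlen2]
    · rw [if_neg hnew]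
      exact ih (pvRefineB f pids slugs) hlen2

-- the three steps after name1, kept opaque so A's loop unfolds one layer at a time
def pvTail (db : PySem.Dict String (PySem.Dict String String)) :
    List (Int → String → String) :=
  [ fun _ p => (db.getD p PySem.Dict.empty).getD "name2" "",
    fun _ p => PySem.Str.slice ((db.getD p PySem.Dict.empty).getD "born" "") (some 2) (some 4),
    fun i _ => (PySem.Str.pyGet? pvAlphabet i).elim "" (fun c => String.ofList [c]) ]

theorem pvZipMap (pids : List String) (g : String → String) :
    pids.zip (pids.map g) = pids.map (fun p => (p, g p)) := by
  induction pids with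
  | nil => rfl
  | cons p ps ih => simp [ih]

theorem pvDZ_map_getD (pids : List String) (g : String → String) (hnd : pids.Nodup)
    (q : String) (hq : q ∈ pids) :
    (pvDZ pids (pids.map g)).getD q "" = g q := by
  apply PySem.Dict.getD_of_mem_items
  · rw [pvDZ_items pids _ hnd (by simp), pvZipMap pids g]
    exact List.mem_map.mpr ⟨q, hq, rfl⟩
  · rw [pvDZ_keys pids _ hnd (by simp)]; exact hnd

-- the first step (over the single block of all pids) just installs name1 everywhere
theorem pvFirst (pids : List String) (hnd : pids.Nodup) (g : String → String) :
    pvF (fun _ pid => g pid) (pvDZ pids (pids.map (fun _ => ""))) pids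
      = pvDZ pids (pids.map g) := by
  have hkeys : (pvF (fun _ pid => g pid) (pvDZ pids (pids.map (fun _ => ""))) pids).keys = pids := by
    unfold pvF
    rw [pvInner_keys (fun _ pid => g pid) pids _ 0 (by
      intro q hq
      rw [pvDZ_keys pids _ hnd (by simp)]
      exact hq)]
    exact pvDZ_keys pids _ hnd (by simp)
  apply PySem.Dict.ext
  rw [PySem.Dict.items_eq_map_keys _ (by rw [hkeys]; exact hnd) ""]
  rw [hkeys, pvDZ_items pids _ hnd (by simp), pvZipMap pids g]
  apply List.map_congr_left
  intro q hq
  rw [pvF_getD _ pids hnd _ q, if_pos hq]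
  rw [pvDZ_map_getD pids _ hnd q hq]
  simp

theorem pvMain (database : List (String × List (String × String))) :
    find_slugs database = find_slugs_alt database := by
  unfold find_slugs find_slugs_alt
  simp only
  set db := pvDB database with hdb
  set pids := db.keys with hpids
  have hnd : pids.Nodup := PySem.Dict.nodup_keys_ofList _
  set g : String → String := fun pid => (db.getD pid PySem.Dict.empty).getD "name1" "" with hg
  set slugs0 := pids.map g with hslugs0
  have hlen0 : slugs0.length = pids.length := by simp [hslugs0]
  set e2 : Int → String → String := fun _ p => (db.getD p PySem.Dict.empty).getD "name2" "" with he2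
  set e3 : Int → String → String :=
    fun _ p => PySem.Str.slice ((db.getD p PySem.Dict.empty).getD "born" "") (some 2) (some 4) with he3
  set e4 : Int → String → String :=
    fun i _ => (PySem.Str.pyGet? pvAlphabet i).elim "" (fun c => String.ofList [c]) with he4
  have htail : pvTail db = [e2, e3, e4] := rfl
  have hdict : PySem.Dict.ofList (pids.map (fun pid => (pid, "")))
      = pvDZ pids (pids.map (fun _ => "")) := by
    unfold pvDZ
    rw [pvZipMap pids (fun _ => "")]
  have hdict1 : PySem.Dict.ofList (pids.map (fun p => (p, g p))) = pvDZ pids slugs0 := by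
    unfold pvDZ
    rw [hslugs0, pvZipMap pids g]
  have hkeys0 : (pvDZ pids (pids.map (fun _ => ""))).keys = pids :=
    pvDZ_keys pids _ hnd (by simp)
  have hn : db.size = pids.length := by
    unfold PySem.Dict.size
    rw [hpids]
    unfold PySem.Dict.keys
    rw [List.length_map]
  rw [hdict, hdict1, hkeys0, hn]
  -- B's three refinements = the chain of list-level steps
  have hl2 : (pvRefineB e2 pids slugs0).length = pids.length := by
    rw [pvRefineB_length e2 pids slugs0 hlen0]; omega
  have hl3 : (pvRefineB e3 pids (pvRefineB e2 pids slugs0)).length = pids.length := by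
    rw [pvRefineB_length e3 pids _ hl2]; omega
  have hB : pvRefine pids (pvRefine pids (pvRefine pids (pvDZ pids slugs0) e2) e3) e4
      = pvDZ pids (pvChain (pvTail db) pids slugs0) := by
    rw [pvRefine_eq e2 pids slugs0 hnd hlen0,
        pvRefine_eq e3 pids _ hnd hl2,
        pvRefine_eq e4 pids _ hnd hl3, htail]
    rfl
  rw [hB]
  -- A's loop over the four steps
  have hsteps : pvStepsA db = (fun _ pid => g pid) :: pvTail db := rfl
  rw [hsteps]
  simp only [pvLoopA]
  rw [List.foldl_cons, List.foldl_nil]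
  rw [pvFirst pids hnd g]
  rw [pvDZ_items pids _ hnd hlen0]
  have hsize : (((pids.zip slugs0).foldl
      (fun g pr => g.modify pr.2 [] (fun b => b ++ [pr.1]))
      (PySem.Dict.empty : PySem.Dict String (List String))).size)
      = (PySem.Set.ofList slugs0).length := by
    unfold PySem.Dict.size
    rw [pvGroups_items pids _ hlen0, List.length_map]
  have hvals : (((pids.zip slugs0).foldl
      (fun g pr => g.modify pr.2 [] (fun b => b ++ [pr.1]))
      (PySem.Dict.empty : PySem.Dict String (List String))).values.filter
        (fun b => 1 < b.length))
      = pvBlocksOf pids slugs0 := by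
    unfold PySem.Dict.values
    rw [pvGroups_items pids _ hlen0, List.map_map]
    rfl
  rw [hsize, hvals]
  by_cases hd : (PySem.Set.ofList slugs0).length = pids.length
  · rw [if_pos hd]
    rw [pvChain_of_nodup (pvTail db) pids slugs0
        (pvNodup_of_len _ (by rw [hd, hlen0])) hlen0]
  · rw [if_neg hd]
    rw [pvLoop_eq (pvTail db) pids hnd slugs0 hlen0]

-- ===== VERDICT (by name: the statement is the Claim_ definition above) =====
theorem find_slugs_spec : Claim_equal_find_slugs := by
  intro database _ _
  unfold Spec_find_slugs
  exact pvMain database
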